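-- pv_equiv track=rewrite | github.com/Arthurnevs/Atividades-LP1 | E9-master/E9-master/soma_linha_coluna/soma_linha_coluna.py | soma_linha_e_coluna
-- ===== SOURCE A (Python) =====
-- def soma_linha_e_coluna(m,i,j):
--   soma = 0
--   for k in range(len(m)):
--     for l in range(len(m[k])):
--       if k == i and l == j:
--         continue
--       if k == i:
--         soma += m[k][l]
--       if l == j:
--         soma += m[k][l]
--
--   return soma
-- ===== SOURCE B (Python) =====
-- def soma_linha_e_coluna(m, i, j):
--     total = 0
--     if 0 <= i < len(m):
--         row = m[i]
--         total = sum(row)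
--         if 0 <= j < len(row):
--             total -= row[j]
--     for k, row in enumerate(m):
--         if k != i and 0 <= j < len(row):
--             total += row[j]
--     return total
-- ===== Notes on version B (the rewrite author's own statement) =====
-- stated objective: faster
-- what changed: B replaces A's scan of every cell of the matrix with one direct sum of row i (minus the intersection if j is in range) plus a single pass down column j skipping row i.
import Mathlib
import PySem

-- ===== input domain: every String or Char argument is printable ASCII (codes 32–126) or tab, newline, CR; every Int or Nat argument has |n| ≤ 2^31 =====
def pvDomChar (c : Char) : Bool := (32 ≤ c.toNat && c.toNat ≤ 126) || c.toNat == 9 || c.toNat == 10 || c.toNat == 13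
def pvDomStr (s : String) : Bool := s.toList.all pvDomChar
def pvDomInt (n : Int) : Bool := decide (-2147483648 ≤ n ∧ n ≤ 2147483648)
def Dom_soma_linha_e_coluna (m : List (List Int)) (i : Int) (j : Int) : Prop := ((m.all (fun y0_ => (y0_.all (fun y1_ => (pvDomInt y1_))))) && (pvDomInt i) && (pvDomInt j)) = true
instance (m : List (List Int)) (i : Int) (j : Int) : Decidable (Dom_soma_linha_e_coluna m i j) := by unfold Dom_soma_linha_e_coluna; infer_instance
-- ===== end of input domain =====

-- B scans only row i plus one column pass instead of every cell: O(rows + |row i|) vs A's O(cells).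

-- ===== PORT A =====
def soma_linha_e_coluna (m : List (List Int)) (i : Int) (j : Int) : Int :=
  (PySem.List.pyRange 0 (m.length : Int) 1).foldl (fun soma k =>
    let row := PySem.List.pyGetD m k []
    (PySem.List.pyRange 0 (row.length : Int) 1).foldl (fun soma l =>
      if k = i ∧ l = j then soma
      else
        let soma := if k = i then soma + PySem.List.pyGetD row l 0 else soma
        if l = j then soma + PySem.List.pyGetD row l 0 else soma) soma) 0

-- ===== PORT B =====
def soma_linha_e_coluna_alt (m : List (List Int)) (i : Int) (j : Int) : Int :=
  let total : Int :=
    if 0 ≤ i ∧ i < (m.length : Int) then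
      let row := PySem.List.pyGetD m i []
      let total := row.sum
      if 0 ≤ j ∧ j < (row.length : Int) then total - PySem.List.pyGetD row j 0 else total
    else 0
  (PySem.List.enumerate m 0).foldl (fun total kr =>
    if kr.1 ≠ i ∧ 0 ≤ j ∧ j < (kr.2.length : Int) then total + PySem.List.pyGetD kr.2 j 0
    else total) total

-- ===== PRECONDITION & SPEC =====
def Spec_soma_linha_e_coluna (m : List (List Int)) (i : Int) (j : Int) (out : Int) : Prop := out = soma_linha_e_coluna_alt m i j
instance (m : List (List Int)) (i : Int) (j : Int) (out : Int) : Decidable (Spec_soma_linha_e_coluna m i j out) := by unfold Spec_soma_linha_e_coluna; infer_instance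

-- ===== CLAIM (what is proved, stated in full; the proofs are below) =====
def Claim_equal_soma_linha_e_coluna : Prop := ∀ (m : List (List Int)) (i : Int) (j : Int), Dom_soma_linha_e_coluna m i j → Spec_soma_linha_e_coluna m i j (soma_linha_e_coluna m i j)

-- ===== LEMMAS AND PROOFS =====

-- column contribution of one row: row[j] when j is a valid (non-negative) index, else 0
def pvG (j : Int) (row : List Int) : Int :=
  if 0 ≤ j ∧ j < (row.length : Int) then PySem.List.pyGetD row j 0 else 0

-- A's inner loop over the first n cells of a row
lemma pv_inner (row : List Int) (i j k : Int) (n : Nat) (hn : n ≤ row.length) (soma : Int) :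
    (PySem.List.pyRange 0 (n : Int) 1).foldl (fun soma l =>
      if k = i ∧ l = j then soma
      else
        let soma := if k = i then soma + PySem.List.pyGetD row l 0 else soma
        if l = j then soma + PySem.List.pyGetD row l 0 else soma) soma
    = soma + (if k = i
        then (row.take n).sum - (if 0 ≤ j ∧ j < (n : Int) then PySem.List.pyGetD row j 0 else 0)
        else (if 0 ≤ j ∧ j < (n : Int) then PySem.List.pyGetD row j 0 else 0)) := by
  induction n generalizing soma with
  | zero =>
      simp [PySem.List.pyRange_one_eq_nil (by omega : (0:Int) ≤ 0)]
      split_ifs <;> simp_all <;> omega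
  | succ n ih =>
      have hle : n ≤ row.length := by omega
      have hlt : n < row.length := by omega
      have hsplit : PySem.List.pyRange 0 ((n+1 : Nat) : Int) 1
          = PySem.List.pyRange 0 (n : Int) 1 ++ [(n : Int)] := by
        push_cast
        exact PySem.List.pyRange_one_succ_right (by omega)
      rw [hsplit, List.foldl_append, ih hle]
      have hget : PySem.List.pyGetD row (n : Int) 0 = row[n] := by
        rw [PySem.List.pyGetD_natCast]
        exact List.getD_eq_getElem row 0 hlt
      have htake : (row.take (n+1)).sum = (row.take n).sum + row[n] := by
        rw [List.take_add_one]
        simp [hlt]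
      simp only []
      by_cases hki : k = i <;> by_cases hjn : (n : Int) = j <;>
        split_ifs <;> simp_all <;> omega

-- A's inner loop over a whole row
lemma pv_inner' (row : List Int) (i j k soma : Int) :
    (PySem.List.pyRange 0 (row.length : Int) 1).foldl (fun soma l =>
      if k = i ∧ l = j then soma
      else
        let soma := if k = i then soma + PySem.List.pyGetD row l 0 else soma
        if l = j then soma + PySem.List.pyGetD row l 0 else soma) soma
    = soma + (if k = i then row.sum - pvG j row else pvG j row) := by
  have := pv_inner row i j k row.length (le_refl _) soma
  simpa [pvG] using this

lemma pv_pyGetD_cons_pos {α : Type} (x : α) (xs : List α) (t : Int) (h : 1 ≤ t) (d : α) :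
    PySem.List.pyGetD (x :: xs) t d = PySem.List.pyGetD xs (t - 1) d := by
  have h0 : (0:Int) ≤ t - 1 := by omega
  obtain ⟨u, hu⟩ : ∃ u : Nat, t - 1 = (u : Int) := ⟨(t-1).toNat, by omega⟩
  have ht : t = ((u + 1 : Nat) : Int) := by push_cast; omega
  rw [hu, ht, PySem.List.pyGetD_natCast, PySem.List.pyGetD_natCast]
  simp

-- congruence for the high-index tail: once every index exceeds i, both summands coincide
lemma pv_tail (i j s : Int) (rows : List (List Int)) (hs : i < s) :
    ((PySem.List.enumerate rows s).map
        (fun kr => if kr.1 = i then kr.2.sum - pvG j kr.2 else pvG j kr.2)).sum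
    = ((PySem.List.enumerate rows s).map
        (fun kr => if kr.1 ≠ i then pvG j kr.2 else 0)).sum := by
  apply congrArg
  apply List.map_congr_left
  intro p hp
  rcases (PySem.List.mem_enumerate_iff rows s p).1 hp with ⟨k, hk, rfl⟩
  have : (s + (k : Int)) ≠ i := by omega
  simp [this]

-- the main decomposition: the mixed sum splits into the row-i part plus the column part
lemma pv_key (i j : Int) (rows : List (List Int)) (s : Int) :
    ((PySem.List.enumerate rows s).map
        (fun kr => if kr.1 = i then kr.2.sum - pvG j kr.2 else pvG j kr.2)).sum
    = (if s ≤ i ∧ i < s + (rows.length : Int)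
        then (PySem.List.pyGetD rows (i - s) []).sum - pvG j (PySem.List.pyGetD rows (i - s) [])
        else 0)
      + ((PySem.List.enumerate rows s).map
          (fun kr => if kr.1 ≠ i then pvG j kr.2 else 0)).sum := by
  induction rows generalizing s with
  | nil =>
      simp only [PySem.List.enumerate_nil, List.map_nil, List.sum_nil, List.length_nil]
      rw [if_neg (by push_cast; omega)]
      simp
  | cons row rows ih =>
      rw [PySem.List.enumerate_cons]
      by_cases hsi : s = i
      · subst hsi
        have htail := pv_tail s j (s + 1) rows (by omega)
        have hidx : PySem.List.pyGetD (row :: rows) (s - s) [] = row := by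
          simp [PySem.List.pyGetD_zero_cons]
        simp only [List.map_cons, List.sum_cons, htail, hidx]
        have hcond : s ≤ s ∧ s < s + ((row :: rows).length : Int) := by
          refine ⟨le_refl s, ?_⟩; simp only [List.length_cons]; push_cast; omega
        rw [if_pos hcond]
        simp
      · have hidx : 1 ≤ i - s → PySem.List.pyGetD (row :: rows) (i - s) []
            = PySem.List.pyGetD rows (i - (s + 1)) [] := by
          intro h
          rw [pv_pyGetD_cons_pos row rows (i - s) h []]
          ring_nf
        simp only [List.map_cons, List.sum_cons, ih (s + 1)]
        by_cases hin : s ≤ i ∧ i < s + ((row :: rows).length : Int)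
        · have h1 : 1 ≤ i - s := by omega
          have hin' : s + 1 ≤ i ∧ i < (s + 1) + (rows.length : Int) := by
            simp only [List.length_cons] at hin; push_cast at hin ⊢; omega
          rw [if_pos hin, if_pos hin', hidx h1]
          simp [hsi]
          try ring
        · have hin' : ¬ (s + 1 ≤ i ∧ i < (s + 1) + (rows.length : Int)) := by
            intro ⟨a, b⟩; apply hin; constructor; omega; simp; omega
          rw [if_neg hin, if_neg hin']
          simp [hsi]
          try ring

-- B's loop body as an add-of-ite fold
lemma pv_foldl_add_if {α : Type} (l : List α) (p : α → Prop) [DecidablePred p] (f : α → Int) (init : Int) :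
    l.foldl (fun acc x => if p x then acc + f x else acc) init
    = init + (l.map (fun x => if p x then f x else 0)).sum := by
  induction l generalizing init with
  | nil => simp
  | cons x xs ih =>
      simp only [List.foldl_cons, List.map_cons, List.sum_cons, ih]
      split_ifs <;> ring

-- a sum over enumerate m 0 is a sum over range-indices
lemma pv_enum_map (F : Int × List Int → Int) (m : List (List Int)) :
    ((PySem.List.enumerate m 0).map F).sum
    = ((PySem.List.pyRange 0 (m.length : Int) 1).map
        (fun k => F (k, PySem.List.pyGetD m k []))).sum := by
  rw [PySem.List.enumerate_eq_map_pyRange m ([] : List Int), List.map_map]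
  rfl

lemma pv_merge (i j : Int) (kr : Int × List Int) :
    (if kr.1 ≠ i ∧ 0 ≤ j ∧ j < (kr.2.length : Int) then PySem.List.pyGetD kr.2 j 0 else 0)
    = (if kr.1 ≠ i then pvG j kr.2 else 0) := by
  unfold pvG
  split_ifs <;> tauto

-- ===== VERDICT (by name: the statement is the Claim_ definition above) =====
theorem soma_linha_e_coluna_spec : Claim_equal_soma_linha_e_coluna := by
  intro m i j _
  show soma_linha_e_coluna m i j = soma_linha_e_coluna_alt m i j
  unfold soma_linha_e_coluna soma_linha_e_coluna_alt
  simp only [pv_inner']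
  rw [PySem.List.foldl_add, pv_foldl_add_if]
  simp only [pv_merge]
  rw [pv_enum_map (fun kr => if kr.1 ≠ i then pvG j kr.2 else 0) m]
  have hkey := pv_key i j m 0
  rw [pv_enum_map (fun kr => if kr.1 = i then kr.2.sum - pvG j kr.2 else pvG j kr.2) m,
      pv_enum_map (fun kr => if kr.1 ≠ i then pvG j kr.2 else 0) m] at hkey
  simp only [] at hkey ⊢
  rw [zero_add, hkey, sub_zero, zero_add]
  congr 1
  unfold pvG
  split_ifs <;> simp_all
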